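-- pv_equiv track=rewrite | github.com/italocampos/teoria-computacao | automaton.py | automaton_2d
-- ===== SOURCE A (Python) =====
-- def automaton_2d(string):
-- 	# Defining initial configuration
-- 	state = 0
-- 	alphabet = 'abc'
--
-- 	# Runing automaton
-- 	for c in string:
-- 		if state == 0:
-- 			if c == 'a':
-- 				state = 1
-- 			elif c == 'b':
-- 				state = 3
-- 			else:
-- 				state = 'invalid'
-- 		elif state == 1:
-- 			if c == 'a':
-- 				state = 1
-- 			elif c == 'b':
-- 				state = 3
-- 			elif c == 'c':
-- 				state = 2
-- 		elif state == 2: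
-- 			if c == 'c':
-- 				state = 2
-- 			else:
-- 				state = 'invalid'
-- 		elif state == 3:
-- 			if c == 'a':
-- 				state = 2
-- 			elif c == 'b':
-- 				state = 3
-- 			else:
-- 				state = 'invalid'
--
-- 		if state == 'invalid' or c not in alphabet:
-- 			return False
--
-- 	# Checking final states
-- 	return state in [1, 2]
-- ===== SOURCE B (Python) =====
-- def automaton_2d(string):
-- 	# Accept exactly the regular language a* b* a c* (pattern check instead of DFA simulation)
-- 	core = string.rstrip('c')
-- 	return bool(core) and core.endswith('a') and all(ch == 'b' for ch in core[:-1].lstrip('a'))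
-- ===== Notes on version B (the rewrite author's own statement) =====
-- stated objective: simpler
-- what changed: Replaced the four-state DFA simulation (nested if/elif per state) by a direct pattern check of the accepted regular language a*b*ac*: strip trailing c-characters, require the remainder to end in the letter a, and the rest before it to be a-characters followed by b-characters.
import Mathlib
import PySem

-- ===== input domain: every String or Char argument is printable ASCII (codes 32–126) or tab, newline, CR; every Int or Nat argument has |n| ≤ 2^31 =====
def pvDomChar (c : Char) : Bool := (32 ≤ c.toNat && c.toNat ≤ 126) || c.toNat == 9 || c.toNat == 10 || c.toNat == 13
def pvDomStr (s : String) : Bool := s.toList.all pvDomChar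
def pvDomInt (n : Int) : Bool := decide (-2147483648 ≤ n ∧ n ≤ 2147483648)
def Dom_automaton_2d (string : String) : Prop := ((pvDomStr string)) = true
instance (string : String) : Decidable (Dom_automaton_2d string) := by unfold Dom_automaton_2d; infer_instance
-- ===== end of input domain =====

-- B replaces A's four-state DFA simulation by a direct pattern check of the accepted
-- language a* b* a c* (strip trailing 'c's, last char must be 'a', rest is a* b*); objective: simpler.

-- ===== PORT A =====
-- literal transliteration of A's loop: state 0..3, `none` plays the role of the string 'invalid';
-- the in-loop early `return False` becomes returning false instead of recursing
def pvAuxA (cs : List Char) (state : Int) : Bool :=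
  match cs with
  | [] => state == 1 || state == 2
  | c :: rest =>
    let state' : Option Int :=
      if state == 0 then
        if c == 'a' then some 1 else if c == 'b' then some 3 else none
      else if state == 1 then
        if c == 'a' then some 1 else if c == 'b' then some 3
        else if c == 'c' then some 2 else some state
      else if state == 2 then
        if c == 'c' then some 2 else none
      else if state == 3 then
        if c == 'a' then some 2 else if c == 'b' then some 3 else none
      else some state
    match state' with
    | none => false
    | some s =>
      if !(c == 'a' || c == 'b' || c == 'c') then false else pvAuxA rest s

def automaton_2d (string : String) : Bool := pvAuxA string.toList 0

-- ===== PORT B =====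
-- transliteration of Source B: rstrip('c') = drop trailing 'c's; endswith('a'); lstrip('a'); all(== 'b')
def automaton_2d_alt (string : String) : Bool :=
  let core := (string.toList.reverse.dropWhile (· == 'c')).reverse
  !core.isEmpty && (core.getLast? == some 'a')
    && ((core.dropLast.dropWhile (· == 'a')).all (· == 'b'))

-- ===== PRECONDITION & SPEC =====
def Spec_automaton_2d (string : String) (out : Bool) : Prop := out = automaton_2d_alt string
instance (string : String) (out : Bool) : Decidable (Spec_automaton_2d string out) := by unfold Spec_automaton_2d; infer_instance

-- ===== CLAIM (what is proved, stated in full; the proofs are below) =====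
def Claim_equal_automaton_2d : Prop := ∀ (string : String), Dom_automaton_2d string → Spec_automaton_2d string (automaton_2d string)

-- ===== LEMMAS AND PROOFS =====

-- the 'core' of B: the string with trailing 'c's removed
def pvCore (l : List Char) : List Char := (l.reverse.dropWhile (· == 'c')).reverse

-- acceptance predicates of A's run from each state, expressed on the core
def pvG0 (k : List Char) : Bool :=
  !k.isEmpty && (k.getLast? == some 'a') && ((k.dropLast.dropWhile (· == 'a')).all (· == 'b'))
def pvG1 (k : List Char) : Bool := k.all (· == 'a') || pvG0 k
def pvG2 (k : List Char) : Bool := k.isEmpty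
def pvG3 (k : List Char) : Bool :=
  !k.isEmpty && (k.getLast? == some 'a') && (k.dropLast.all (· == 'b'))

lemma pvCore_cons_ne {x : Char} (t : List Char) (hx : (x == 'c') = false) :
    pvCore (x :: t) = x :: pvCore t := by
  simp [pvCore, List.dropWhile_append, hx]

lemma pvCore_cons_c (t : List Char) :
    pvCore ('c' :: t) = if pvCore t = [] then [] else 'c' :: pvCore t := by
  by_cases h : t.reverse.dropWhile (· == 'c') = []
  · simp [pvCore, List.dropWhile_append, h]
  · simp [pvCore, List.dropWhile_append, h]

-- absorption: a nonempty all-'a' core is accepted by pvG0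
lemma pvG0_of_all_a {k : List Char} (hne : k ≠ []) (h : k.all (· == 'a') = true) :
    pvG0 k = true := by
  have hlast : k.getLast? = some 'a' := by
    rw [List.getLast?_eq_some_getLast hne]
    have := List.all_eq_true.mp h _ (List.getLast_mem hne)
    simpa using this
  have hdrop : k.dropLast.dropWhile (· == 'a') = [] := by
    rw [List.dropWhile_eq_nil_iff]
    intro x hx
    exact List.all_eq_true.mp h _ (List.dropLast_subset k hx)
  simp [pvG0, hne, hlast, hdrop]

lemma pvG1_eq_pvG0 {k : List Char} (hne : k ≠ []) : pvG1 k = pvG0 k := by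
  unfold pvG1
  by_cases h : k.all (· == 'a') = true
  · simp [h, pvG0_of_all_a hne h]
  · simp [Bool.eq_false_iff.mpr h]

-- cons-level bridge lemmas
lemma pvG0_cons_a (k : List Char) : pvG0 ('a' :: k) = pvG1 k := by
  cases k with
  | nil => decide
  | cons y ys =>
    rw [pvG1_eq_pvG0 (by simp)]
    simp [pvG0]

lemma pvG1_cons_a (k : List Char) : pvG1 ('a' :: k) = pvG1 k := by
  cases k with
  | nil => decide
  | cons y ys =>
    rw [pvG1_eq_pvG0 (by simp), pvG1_eq_pvG0 (by simp), pvG0_cons_a,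
        pvG1_eq_pvG0 (by simp)]

lemma pvG3_cons_a (k : List Char) : pvG3 ('a' :: k) = pvG2 k := by
  cases k with
  | nil => decide
  | cons y ys => simp [pvG3, pvG2]

lemma pvG0_cons_b (k : List Char) : pvG0 ('b' :: k) = pvG3 k := by
  cases k with
  | nil => decide
  | cons y ys => simp [pvG0, pvG3]

lemma pvG1_cons_b (k : List Char) : pvG1 ('b' :: k) = pvG3 k := by
  rw [pvG1_eq_pvG0 (by simp), pvG0_cons_b]

lemma pvG3_cons_b (k : List Char) : pvG3 ('b' :: k) = pvG3 k := by
  cases k with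
  | nil => decide
  | cons y ys => simp [pvG3]

lemma pvG0_cons_c {k : List Char} (hne : k ≠ []) : pvG0 ('c' :: k) = false := by
  cases k with
  | nil => exact absurd rfl hne
  | cons y ys => simp [pvG0]

lemma pvG1_cons_c {k : List Char} (hne : k ≠ []) : pvG1 ('c' :: k) = false := by
  rw [pvG1_eq_pvG0 (by simp), pvG0_cons_c hne]

lemma pvG3_cons_c {k : List Char} (hne : k ≠ []) : pvG3 ('c' :: k) = false := by
  cases k with
  | nil => exact absurd rfl hne
  | cons y ys => simp [pvG3]

lemma pvG0_cons_other {x : Char} (k : List Char)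
    (ha : (x == 'a') = false) (hb : (x == 'b') = false) : pvG0 (x :: k) = false := by
  cases k with
  | nil => simp [pvG0, ha]
  | cons y ys => simp [pvG0, ha, hb]

lemma pvG1_cons_other {x : Char} (k : List Char)
    (ha : (x == 'a') = false) (hb : (x == 'b') = false) : pvG1 (x :: k) = false := by
  rw [pvG1_eq_pvG0 (by simp), pvG0_cons_other k ha hb]

lemma pvG3_cons_other {x : Char} (k : List Char)
    (ha : (x == 'a') = false) (hb : (x == 'b') = false) : pvG3 (x :: k) = false := by
  cases k with
  | nil => simp [pvG3, ha]
  | cons y ys => simp [pvG3, hb]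

-- the main simultaneous characterisation of A's run from each reachable state
lemma pvAuxA_char (l : List Char) :
    pvAuxA l 0 = pvG0 (pvCore l) ∧ pvAuxA l 1 = pvG1 (pvCore l) ∧
    pvAuxA l 2 = pvG2 (pvCore l) ∧ pvAuxA l 3 = pvG3 (pvCore l) := by
  induction l with
  | nil => decide
  | cons c t ih =>
    obtain ⟨ih0, ih1, ih2, ih3⟩ := ih
    by_cases hca : c = 'a'
    · subst hca
      rw [pvCore_cons_ne t (by decide)]
      refine ⟨?_, ?_, ?_, ?_⟩ <;>
        simp [pvAuxA, ih1, ih2, pvG0_cons_a, pvG1_cons_a, pvG3_cons_a, pvG2]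
    · by_cases hcb : c = 'b'
      · subst hcb
        rw [pvCore_cons_ne t (by decide)]
        refine ⟨?_, ?_, ?_, ?_⟩ <;>
          simp [pvAuxA, ih3, pvG0_cons_b, pvG1_cons_b, pvG3_cons_b, pvG2]
      · by_cases hcc : c = 'c'
        · subst hcc
          rw [pvCore_cons_c t]
          by_cases h : pvCore t = []
          · refine ⟨?_, ?_, ?_, ?_⟩ <;>
              simp [pvAuxA, ih2, h, pvG0, pvG1, pvG2, pvG3]
          · refine ⟨?_, ?_, ?_, ?_⟩ <;>
              simp [pvAuxA, ih2, h, pvG0_cons_c h, pvG1_cons_c h, pvG3_cons_c h, pvG2]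
        · have ha : (c == 'a') = false := by simpa using hca
          have hb : (c == 'b') = false := by simpa using hcb
          have hc : (c == 'c') = false := by simpa using hcc
          rw [pvCore_cons_ne t hc]
          refine ⟨?_, ?_, ?_, ?_⟩ <;>
            simp [pvAuxA, ha, hb, hc, pvG0_cons_other _ ha hb, pvG1_cons_other _ ha hb,
              pvG3_cons_other _ ha hb, pvG2]

-- ===== VERDICT (by name: the statement is the Claim_ definition above) =====
theorem automaton_2d_spec : Claim_equal_automaton_2d := by
  intro string _
  unfold Spec_automaton_2d automaton_2d automaton_2d_alt
  rw [(pvAuxA_char string.toList).1]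
  rfl
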